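-- pv_equiv track=rewrite | github.com/Ars99/Crypto-labs-2020 | Crypto_lab_1/main.py | getfirstfivebits
-- ===== SOURCE A (Python) =====
-- zero = 0
--
-- iterator_five = 5
--
-- def getfirstfivebits(keys_get, key_number):
--     s = keys_get[key_number]
--     first_eight_bits = s[zero]
--     first_five_bits = ''
--     for j in range(iterator_five):
--         first_five_bits = first_five_bits + str(((first_eight_bits >> j) & 1))
--     reverse_five_bits = first_five_bits[::-1]
--     return (int(reverse_five_bits, base=2))
-- ===== SOURCE B (Python) =====
-- def getfirstfivebits(keys_get, key_number):
--     # The loop builds the low five bits LSB-first and reverses before int(..., 2),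
--     # which is exactly the low five bits of the byte: mask with 31.
--     return keys_get[key_number][0] & 31
-- ===== Notes on version B (the rewrite author's own statement) =====
-- stated objective: simpler
-- what changed: The per-bit loop, string construction, string reversal and base-2 reparse are replaced by the closed form keys_get[key_number][0] & 31, since appending bits j=0..4 LSB-first and reversing yields exactly the low five bits.
import Mathlib
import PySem

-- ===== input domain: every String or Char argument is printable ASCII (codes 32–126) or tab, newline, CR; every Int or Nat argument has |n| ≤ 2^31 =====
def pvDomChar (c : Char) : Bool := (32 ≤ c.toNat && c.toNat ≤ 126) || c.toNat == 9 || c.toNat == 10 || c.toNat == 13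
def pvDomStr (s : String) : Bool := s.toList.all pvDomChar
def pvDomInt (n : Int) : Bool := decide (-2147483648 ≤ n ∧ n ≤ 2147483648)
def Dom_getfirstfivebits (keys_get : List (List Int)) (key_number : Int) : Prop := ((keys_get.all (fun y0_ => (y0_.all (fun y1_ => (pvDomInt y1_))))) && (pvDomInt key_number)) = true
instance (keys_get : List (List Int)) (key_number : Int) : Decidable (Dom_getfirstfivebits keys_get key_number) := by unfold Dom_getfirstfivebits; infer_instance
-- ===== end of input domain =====

-- B replaces the bit-by-bit string building + reversal + base-2 reparse by the closed form
-- keys_get[key_number][0] & 31 (the loop produces exactly the low five bits). Objective: simpler.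

-- ===== PORT A =====
def getfirstfivebits (keys_get : List (List Int)) (key_number : Int) : Int :=
  let s := PySem.List.pyGetD keys_get key_number []          -- keys_get[key_number]; in range under Pre_
  let first_eight_bits := PySem.List.pyGetD s 0 0            -- s[0]; s ≠ [] under Pre_
  let first_five_bits : List Char :=
    (PySem.List.pyRange 0 5 1).foldl
      (fun acc j => acc ++ PySem.Int.toChars (PySem.Int.band (first_eight_bits >>> j.toNat) 1)) []
  -- s[::-1]: slice? with step -1 is never none
  let reverse_five_bits := (PySem.List.slice? first_five_bits none none (-1)).getD []
  -- int(reverse_five_bits, base=2): the string is always five '0'/'1' chars, so never none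
  (PySem.Int.ofCharsBase? reverse_five_bits 2).getD 0

-- ===== PORT B =====
def getfirstfivebits_alt (keys_get : List (List Int)) (key_number : Int) : Int :=
  PySem.Int.band (PySem.List.pyGetD (PySem.List.pyGetD keys_get key_number []) 0 0) 31

-- ===== PRECONDITION & SPEC =====
-- A raises IndexError when key_number is out of range or the selected key list is empty.
def Pre_getfirstfivebits (keys_get : List (List Int)) (key_number : Int) : Prop :=
  PySem.Raise.InRange keys_get.length key_number ∧ PySem.List.pyGetD keys_get key_number [] ≠ []
instance (keys_get : List (List Int)) (key_number : Int) : Decidable (Pre_getfirstfivebits keys_get key_number) := by unfold Pre_getfirstfivebits; infer_instance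

def pvWitness_getfirstfivebits : List (List Int) × Int := ([[173, 4]], 0)

def Spec_getfirstfivebits (keys_get : List (List Int)) (key_number : Int) (out : Int) : Prop := out = getfirstfivebits_alt keys_get key_number
instance (keys_get : List (List Int)) (key_number : Int) (out : Int) : Decidable (Spec_getfirstfivebits keys_get key_number out) := by unfold Spec_getfirstfivebits; infer_instance

-- ===== CLAIM (what is proved, stated in full; the proofs are below) =====
def Claim_equal_getfirstfivebits : Prop := ∀ (keys_get : List (List Int)) (key_number : Int), Dom_getfirstfivebits keys_get key_number → Pre_getfirstfivebits keys_get key_number → Spec_getfirstfivebits keys_get key_number (getfirstfivebits keys_get key_number)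

-- ===== LEMMAS AND PROOFS =====

-- masking with 31 is remainder mod 32, for every integer (Python two's-complement &)
theorem band31_eq_emod (b : Int) : PySem.Int.band b 31 = b % 32 := by
  have h1 : ∀ n : Nat, n &&& 31 = n % 32 := fun n => Nat.and_two_pow_sub_one_eq_mod n 5
  unfold PySem.Int.band
  split_ifs with hb h2 h2
  · rw [show Int.toNat 31 = 31 from rfl, h1]; omega
  · exact absurd (by norm_num) h2
  · rw [show Int.toNat 31 = 31 from rfl, Nat.land_comm, h1]; omega
  · exact absurd (by norm_num) h2

-- reversing five one-character bit strings and reading them base 2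
theorem bits5_parse (e0 e1 e2 e3 e4 : Int)
    (h0 : e0 = 0 ∨ e0 = 1) (h1 : e1 = 0 ∨ e1 = 1) (h2 : e2 = 0 ∨ e2 = 1)
    (h3 : e3 = 0 ∨ e3 = 1) (h4 : e4 = 0 ∨ e4 = 1) :
    (PySem.Int.ofCharsBase?
      ((PySem.List.slice?
        ([] ++ PySem.Int.toChars e0 ++ PySem.Int.toChars e1 ++ PySem.Int.toChars e2
            ++ PySem.Int.toChars e3 ++ PySem.Int.toChars e4) none none (-1)).getD []) 2).getD 0
    = 16 * e4 + 8 * e3 + 4 * e2 + 2 * e1 + e0 := by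
  rcases h0 with rfl | rfl <;> rcases h1 with rfl | rfl <;> rcases h2 with rfl | rfl <;>
    rcases h3 with rfl | rfl <;> rcases h4 with rfl | rfl <;> decide

theorem core_eq (b : Int) :
    (PySem.Int.ofCharsBase?
      ((PySem.List.slice?
        ((PySem.List.pyRange 0 5 1).foldl
          (fun acc j => acc ++ PySem.Int.toChars (PySem.Int.band (b >>> j.toNat) 1)) [])
        none none (-1)).getD []) 2).getD 0 = PySem.Int.band b 31 := by
  have hbit : ∀ x : Int, PySem.Int.band x 1 = 0 ∨ PySem.Int.band x 1 = 1 := by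
    intro x
    rw [PySem.Int.band_one, PySem.Int.mod_eq_emod_of_pos (by omega)]
    omega
  rw [show PySem.List.pyRange 0 5 1 = [0, 1, 2, 3, 4] from rfl]
  simp only [List.foldl]
  have hs : ∀ j : Int, PySem.Int.band (b >>> ((j.toNat : Nat) : Int)) 1 = (b / (2 ^ j.toNat : Nat)) % 2 := by
    intro j
    rw [PySem.Int.band_one, PySem.Int.mod_eq_emod_of_pos (by omega),
      Int.shiftRight_natCast_right, Int.shiftRight_eq_div_pow]
  rw [bits5_parse _ _ _ _ _ (hbit _) (hbit _) (hbit _) (hbit _) (hbit _), band31_eq_emod]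
  simp only [hs]
  simp only [show Int.toNat 0 = 0 from rfl, show Int.toNat 1 = 1 from rfl,
    show Int.toNat 2 = 2 from rfl, show Int.toNat 3 = 3 from rfl, show Int.toNat 4 = 4 from rfl]
  norm_num
  omega

-- ===== VERDICT (by name: the statement is the Claim_ definition above) =====
theorem getfirstfivebits_spec : Claim_equal_getfirstfivebits := by
  intro keys_get key_number _ _
  unfold Spec_getfirstfivebits getfirstfivebits getfirstfivebits_alt
  exact core_eq _
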